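-- pv_equiv track=rewrite | github.com/thejoggeli/mse_algorithms | MyTSP.py | exhaustive_tours
-- ===== SOURCE A (Python) =====
-- def exhaustive_tours(index, start, k, complete):
--
--     index.pop(start)
--     tours = []
--
--     def ex(k, index, t):
--         k -= 1
--         if(k >= 0 and len(index.keys()) > 0):
--             for i in index.keys():
--                 ic = index.copy()
--                 ic.pop(i)
--                 tc = t.copy()
--                 tc.append(i)
--                 ex(k, ic, tc)
--         else:
--             tc = t.copy()
--             if(complete):
--                 tc.append(start)
--             tours.append(tc)
--
--     ex(k, index, [start])
--
--     return tours
-- ===== SOURCE B (Python) =====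
-- def exhaustive_tours(index, start, k, complete):
--     # Breadth-first frontier expansion instead of A's recursive DFS with dict copies.
--     index.pop(start)
--     remaining = list(index.keys())
--     frontier = [([start], remaining)]
--     for _ in range(min(k, len(remaining))):
--         new_frontier = []
--         for tour, unused in frontier:
--             if unused:
--                 for i in unused:
--                     new_frontier.append((tour + [i], [x for x in unused if x != i]))
--             else:
--                 new_frontier.append((tour, unused))
--         frontier = new_frontier
--     tail = [start] if complete else []
--     return [tour + tail for tour, _ in frontier]
-- ===== Notes on version B (the rewrite author's own statement) =====
-- stated objective: alternative
-- what changed: Replaced A's recursive DFS with per-node dict copies and a closure-mutated accumulator by an iterative breadth-first frontier of (tour, unused-keys) pairs expanded min(k, n) times.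
import Mathlib
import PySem

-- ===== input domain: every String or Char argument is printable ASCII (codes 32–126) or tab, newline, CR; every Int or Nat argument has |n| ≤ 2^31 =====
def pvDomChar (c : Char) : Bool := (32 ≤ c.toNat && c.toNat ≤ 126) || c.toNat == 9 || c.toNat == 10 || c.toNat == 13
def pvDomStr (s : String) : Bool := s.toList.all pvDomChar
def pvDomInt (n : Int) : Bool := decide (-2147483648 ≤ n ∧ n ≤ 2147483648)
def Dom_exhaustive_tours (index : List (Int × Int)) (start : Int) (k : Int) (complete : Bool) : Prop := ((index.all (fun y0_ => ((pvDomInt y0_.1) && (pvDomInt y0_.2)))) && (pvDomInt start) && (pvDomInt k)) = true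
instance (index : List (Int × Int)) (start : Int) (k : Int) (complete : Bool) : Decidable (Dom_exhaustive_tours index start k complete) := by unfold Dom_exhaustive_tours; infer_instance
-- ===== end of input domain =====

-- B replaces A's recursive DFS (which copies the dict at every node) by an iterative
-- breadth-first frontier of (tour, unused-keys) pairs expanded min(k, n) times; same output.
-- Both A and B mutate the caller's dict (index.pop(start)); the equivalence proved is about the return value.

-- ===== PORT A =====
-- inner recursive helper `ex`; the global `tours` accumulator becomes the returned list (DFS
-- order preserved); `.attach` only supplies the membership fact needed for termination.
def pvExA (complete : Bool) (start : Int) (k : Int) (index : PySem.Dict Int Int) (t : List Int) : List (List Int) :=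
  if k - 1 ≥ 0 ∧ 0 < (PySem.Dict.keys index).length then
    (PySem.Dict.keys index).attach.flatMap (fun i =>
      pvExA complete start (k - 1) (PySem.Dict.erase index i.1) (t ++ [i.1]))
  else
    [t ++ (if complete then [start] else [])]
termination_by index.items.length
decreasing_by
  simp only [PySem.Dict.erase]
  refine List.length_filter_lt_length_iff_exists.mpr ?_
  have hi := i.2
  simp only [PySem.Dict.keys, List.mem_map] at hi
  obtain ⟨p, hp, hpe⟩ := hi
  exact ⟨p, hp, by simp [hpe]⟩

def exhaustive_tours (index : List (Int × Int)) (start : Int) (k : Int) (complete : Bool) : List (List Int) :=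
  match PySem.Dict.pop? (PySem.Dict.ofList index) start with
  | none => []  -- index.pop(start) raises KeyError: excluded by Pre_
  | some (_, d) => pvExA complete start k d [start]

-- ===== PORT B =====
-- one frontier-expansion round (the body of Source B's `for _ in range(...)` loop)
def pvStepB (L : List (List Int × List Int)) : List (List Int × List Int) :=
  L.flatMap (fun p =>
    if p.2 = [] then [p]
    else p.2.map (fun i => (p.1 ++ [i], p.2.filter (fun x => !(x == i)))))

def exhaustive_tours_alt (index : List (Int × Int)) (start : Int) (k : Int) (complete : Bool) : List (List Int) :=
  match PySem.Dict.pop? (PySem.Dict.ofList index) start with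
  | none => []  -- index.pop(start) raises KeyError: excluded by Pre_
  | some (_, d) =>
    let remaining := PySem.Dict.keys d
    let frontier := (PySem.List.pyRange 0 (min k (remaining.length : Int)) 1).foldl
      (fun L _ => pvStepB L) [([start], remaining)]
    let tail := if complete then [start] else []
    frontier.map (fun p => p.1 ++ tail)

-- ===== PRECONDITION & SPEC =====
-- Pre_ excludes exactly the inputs where index.pop(start) raises KeyError (start not a key).
def Pre_exhaustive_tours (index : List (Int × Int)) (start : Int) (k : Int) (complete : Bool) : Prop :=
  start ∈ index.map Prod.fst
instance (index : List (Int × Int)) (start : Int) (k : Int) (complete : Bool) : Decidable (Pre_exhaustive_tours index start k complete) := by unfold Pre_exhaustive_tours; infer_instance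

def pvWitness_exhaustive_tours : (List (Int × Int)) × Int × Int × Bool := ([(1, 0), (2, 0), (3, 0)], 1, 2, true)

def Spec_exhaustive_tours (index : List (Int × Int)) (start : Int) (k : Int) (complete : Bool) (out : List (List Int)) : Prop := out = exhaustive_tours_alt index start k complete
instance (index : List (Int × Int)) (start : Int) (k : Int) (complete : Bool) (out : List (List Int)) : Decidable (Spec_exhaustive_tours index start k complete out) := by unfold Spec_exhaustive_tours; infer_instance

-- ===== CLAIM (what is proved, stated in full; the proofs are below) =====
def Claim_equal_exhaustive_tours : Prop := ∀ (index : List (Int × Int)) (start : Int) (k : Int) (complete : Bool), Dom_exhaustive_tours index start k complete → Pre_exhaustive_tours index start k complete → Spec_exhaustive_tours index start k complete (exhaustive_tours index start k complete)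

-- ===== LEMMAS AND PROOFS =====

-- the common DFS tree, on a plain list of unused keys
def pvGen (complete : Bool) (start : Int) (k : Int) (u : List Int) (t : List Int) : List (List Int) :=
  if k - 1 ≥ 0 ∧ 0 < u.length then
    u.attach.flatMap (fun i =>
      pvGen complete start (k - 1) (u.filter (fun x => !(x == i.1))) (t ++ [i.1]))
  else
    [t ++ (if complete then [start] else [])]
termination_by u.length
decreasing_by
  simp only [List.length_unattach]
  have h := List.length_filter_lt_length_iff_exists.mpr
    (⟨i, List.mem_attach u i, by simp⟩ :
      ∃ x ∈ u.attach, ¬((fun x : {x // x ∈ u} => !((x : Int) == (i : Int))) x = true))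
  simpa using h

theorem pv_flatMap_attach (u : List Int) (f : Int → List (List Int)) :
    u.attach.flatMap (fun i => f i.1) = u.flatMap f := by
  conv_rhs => rw [← List.attach_map_subtype_val u]
  rw [List.flatMap_map]

theorem pv_keys_erase (d : PySem.Dict Int Int) (i : Int) :
    PySem.Dict.keys (PySem.Dict.erase d i) = (PySem.Dict.keys d).filter (fun x => !(x == i)) := by
  simp only [PySem.Dict.keys, PySem.Dict.erase, List.filter_map]
  rfl

theorem pvExA_eq_gen (complete : Bool) (start : Int) :
    ∀ n (k : Int) (d : PySem.Dict Int Int) (t : List Int), d.items.length = n →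
      pvExA complete start k d t = pvGen complete start k (PySem.Dict.keys d) t := by
  intro n
  induction n using Nat.strong_induction_on with
  | _ n ih =>
    intro k d t hn
    rw [pvExA, pvGen]
    split
    · apply List.flatMap_congr
      intro i _
      have hlt : (PySem.Dict.erase d i.1).items.length < n := by
        subst hn
        simp only [PySem.Dict.erase]
        refine List.length_filter_lt_length_iff_exists.mpr ?_
        have hi := i.2
        simp only [PySem.Dict.keys, List.mem_map] at hi
        obtain ⟨p, hp, hpe⟩ := hi
        exact ⟨p, hp, by simp [hpe]⟩
      exact (ih _ hlt (k - 1) (PySem.Dict.erase d i.1) (t ++ [i.1]) rfl).trans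
        (by rw [pv_keys_erase])
    · rfl

theorem pvStepB_flat (L : List (List Int × List Int)) (n : ℕ) :
    pvStepB^[n] L = L.flatMap (fun p => pvStepB^[n] [p]) := by
  induction n generalizing L with
  | zero => simp
  | succ n ih =>
    have h1 : ∀ M, pvStepB M = M.flatMap (fun p => pvStepB [p]) := by
      intro M; simp [pvStepB]
    rw [Function.iterate_succ_apply, h1, ih, List.flatMap_assoc]
    apply List.flatMap_congr
    intro p _
    rw [Function.iterate_succ_apply, ih]

theorem pv_filter_ne_length (i : Int) :
    ∀ u : List Int, u.Nodup → i ∈ u → (u.filter (fun x => !(x == i))).length = u.length - 1 := by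
  intro u
  induction u with
  | nil => intro _ h; cases h
  | cons a u ih =>
    intro hnd hmem
    rcases List.nodup_cons.mp hnd with ⟨hna, hndu⟩
    by_cases ha : a = i
    · subst ha
      have hfu : u.filter (fun x => !(x == a)) = u :=
        List.filter_eq_self.mpr (fun x hx => by
          simp only [Bool.not_eq_eq_eq_not, Bool.not_true, beq_eq_false_iff_ne]
          exact fun he => hna (he ▸ hx))
      simp [hfu]
    · have hiu : i ∈ u := by
        cases List.mem_cons.mp hmem with
        | inl h => exact absurd h.symm ha
        | inr h => exact h
      have hpos := List.length_pos_of_mem hiu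
      have := ih hndu hiu
      simp only [List.filter_cons]
      rw [if_pos (by simp [ha])]
      simp only [List.length_cons, this]
      omega

theorem pvStepB_eq_gen (complete : Bool) (start : Int) :
    ∀ (n : ℕ) (k : Int) (u t : List Int), u.Nodup → n = (min k (u.length : Int)).toNat →
      (pvStepB^[n] [(t, u)]).map (fun p => p.1 ++ (if complete then [start] else [])) =
        pvGen complete start k u t := by
  intro n
  induction n with
  | zero =>
    intro k u t _ hn
    have hng : ¬(k - 1 ≥ 0 ∧ 0 < u.length) := by
      rintro ⟨h1, h2⟩
      have h3 : (1 : Int) ≤ (u.length : Int) := by exact_mod_cast h2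
      omega
    rw [pvGen, if_neg hng]
    simp
  | succ n ih =>
    intro k u t hu hn
    have hmin : min k (u.length : Int) = n + 1 := by omega
    have hlen' : 0 < u.length := by omega
    have hne : u ≠ [] := by
      intro h; subst h; simp at hlen'
    have hg : k - 1 ≥ 0 ∧ 0 < u.length := ⟨by omega, hlen'⟩
    rw [pvGen, if_pos hg]
    rw [Function.iterate_succ_apply]
    have hstep : pvStepB [(t, u)] =
        u.map (fun i => (t ++ [i], u.filter (fun x => !(x == i)))) := by
      simp [pvStepB, hne]
    rw [hstep, pvStepB_flat, List.flatMap_map, List.map_flatMap]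
    rw [← pv_flatMap_attach u (fun i => (pvStepB^[n] [(t ++ [i], u.filter (fun x => !(x == i)))]).map
      (fun p => p.1 ++ (if complete then [start] else [])))]
    apply List.flatMap_congr
    intro i _
    exact ih (k - 1) (u.filter (fun x => !(x == i.1))) (t ++ [i.1]) (hu.filter _)
      (by rw [pv_filter_ne_length i.1 u hu i.2]; omega)

theorem pv_foldl_const {α β : Type} (f : α → α) : ∀ (l : List β) (a : α),
    l.foldl (fun x _ => f x) a = f^[l.length] a := by
  intro l
  induction l with
  | nil => intro a; rfl
  | cons b l ih => intro a; simp [List.foldl_cons, ih, Function.iterate_succ_apply]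

theorem pv_pyRange_length (m : Int) : (PySem.List.pyRange 0 m 1).length = m.toNat := by
  simp [pysem]

-- ===== VERDICT (by name: the statement is the Claim_ definition above) =====
theorem exhaustive_tours_spec : Claim_equal_exhaustive_tours := by
  intro index start k complete _ _
  unfold Spec_exhaustive_tours exhaustive_tours exhaustive_tours_alt
  cases hg : PySem.Dict.get? (PySem.Dict.ofList index) start with
  | none => simp only [PySem.Dict.pop?, hg, Option.map_none]
  | some v =>
    simp only [PySem.Dict.pop?, hg, Option.map_some]
    rw [pv_foldl_const, pv_pyRange_length]
    rw [pvStepB_eq_gen complete start _ k _ [start] ?nd rfl]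
    · exact pvExA_eq_gen complete start _ k _ [start] rfl
    case nd =>
      rw [pv_keys_erase]
      exact (PySem.Dict.nodup_keys_ofList index).filter _
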